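-- pv_equiv track=rewrite | github.com/CarlosGBerreteaga/trading-ai | src/auto_trade.py | build_trades
-- ===== SOURCE A (Python) =====
-- from typing import Dict, List, Tuple
--
-- def build_trades(
--     current: List[str],
--     recommended: List[str],
--     keep_existing: bool,
-- ) -> Tuple[List[str], List[str], List[str]]:
--     current_set = {sym.upper() for sym in current}
--     recommended_set = {sym.upper() for sym in recommended}
--     if keep_existing:
--         new_set = current_set | recommended_set
--     else:
--         new_set = recommended_set
--
--     buys = sorted(new_set - current_set)
--     holds = sorted(new_set & current_set)
--     sells = sorted(current_set - new_set)
--     return buys, holds, sells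
-- ===== SOURCE B (Python) =====
-- def build_trades(current, recommended, keep_existing):
--     cur = {s.upper() for s in current}
--     rec = {s.upper() for s in recommended}
--     buys, holds, sells = [], [], []
--     for sym in sorted(cur | rec):
--         in_cur = sym in cur
--         in_new = (keep_existing and in_cur) or sym in rec
--         if in_new and not in_cur:
--             buys.append(sym)
--         elif in_new and in_cur:
--             holds.append(sym)
--         else:
--             sells.append(sym)
--     return buys, holds, sells
-- ===== Notes on version B (the rewrite author's own statement) =====
-- stated objective: alternative
-- what changed: Replaces the three separate set-difference/intersection expressions each sorted on its own by one sort of the union followed by a single membership-classification pass that appends each symbol to buys/holds/sells.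
import Mathlib
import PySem

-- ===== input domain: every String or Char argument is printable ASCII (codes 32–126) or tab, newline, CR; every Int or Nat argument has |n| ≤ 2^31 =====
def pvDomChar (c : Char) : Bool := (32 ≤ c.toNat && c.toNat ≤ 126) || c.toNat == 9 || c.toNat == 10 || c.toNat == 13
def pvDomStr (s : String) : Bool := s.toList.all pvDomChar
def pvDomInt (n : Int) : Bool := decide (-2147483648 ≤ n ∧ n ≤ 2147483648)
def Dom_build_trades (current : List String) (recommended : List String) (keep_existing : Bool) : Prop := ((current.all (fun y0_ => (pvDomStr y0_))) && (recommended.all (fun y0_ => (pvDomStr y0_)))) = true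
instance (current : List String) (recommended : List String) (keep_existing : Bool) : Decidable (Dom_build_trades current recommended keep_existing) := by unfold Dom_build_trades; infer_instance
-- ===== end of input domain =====

-- B replaces the three set-difference/intersection expressions (each sorted separately) by a
-- single classification pass over the sorted union, appending each symbol to buys/holds/sells;
-- objective: alternative decomposition (one sort, one pass) of the same cost.

-- ===== PORT A =====
def build_trades (current : List String) (recommended : List String) (keep_existing : Bool) : List String × List String × List String :=
  let current_set : PySem.Set String := PySem.Set.ofList (current.map PySem.Str.upper)
  let recommended_set : PySem.Set String := PySem.Set.ofList (recommended.map PySem.Str.upper)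
  let new_set : PySem.Set String :=
    if keep_existing then PySem.Set.union current_set recommended_set else recommended_set
  let buys := PySem.List.sorted (PySem.Set.diff new_set current_set) (fun x => x) false
  let holds := PySem.List.sorted (PySem.Set.inter new_set current_set) (fun x => x) false
  let sells := PySem.List.sorted (PySem.Set.diff current_set new_set) (fun x => x) false
  (buys, holds, sells)

-- ===== PORT B =====
def build_trades_alt (current : List String) (recommended : List String) (keep_existing : Bool) : List String × List String × List String :=
  let cur : PySem.Set String := PySem.Set.ofList (current.map PySem.Str.upper)
  let rec' : PySem.Set String := PySem.Set.ofList (recommended.map PySem.Str.upper)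
  (PySem.List.sorted (PySem.Set.union cur rec') (fun x => x) false).foldl
    (fun acc sym =>
      let inCur := PySem.Set.contains cur sym
      let inNew := (keep_existing && inCur) || PySem.Set.contains rec' sym
      if inNew && !inCur then (acc.1 ++ [sym], acc.2.1, acc.2.2)
      else if inNew && inCur then (acc.1, acc.2.1 ++ [sym], acc.2.2)
      else (acc.1, acc.2.1, acc.2.2 ++ [sym]))
    ([], [], [])

-- ===== PRECONDITION & SPEC =====
def Spec_build_trades (current : List String) (recommended : List String) (keep_existing : Bool) (out : List String × List String × List String) : Prop := out = build_trades_alt current recommended keep_existing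
instance (current : List String) (recommended : List String) (keep_existing : Bool) (out : List String × List String × List String) : Decidable (Spec_build_trades current recommended keep_existing out) := by unfold Spec_build_trades; infer_instance

-- ===== CLAIM (what is proved, stated in full; the proofs are below) =====
def Claim_equal_build_trades : Prop := ∀ (current : List String) (recommended : List String) (keep_existing : Bool), Dom_build_trades current recommended keep_existing → Spec_build_trades current recommended keep_existing (build_trades current recommended keep_existing)

-- ===== LEMMAS AND PROOFS =====

-- The classification fold appends to three accumulators = three filters of the traversed list.
theorem foldl_classify (p1 p2 : String → Bool) (l : List String) (a b c : List String) :
    l.foldl (fun acc sym =>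
      if p1 sym then (acc.1 ++ [sym], acc.2.1, acc.2.2)
      else if p2 sym then (acc.1, acc.2.1 ++ [sym], acc.2.2)
      else (acc.1, acc.2.1, acc.2.2 ++ [sym])) (a, b, c)
    = (a ++ l.filter p1, b ++ l.filter (fun s => !p1 s && p2 s),
       c ++ l.filter (fun s => !p1 s && !p2 s)) := by
  induction l generalizing a b c with
  | nil => simp
  | cons x xs ih =>
    by_cases h1 : p1 x = true
    · simp [h1, ih]
    · by_cases h2 : p2 x = true
      · simp [h1, h2, ih]
      · simp [h1, h2, ih]

-- sorted of a nodup list that has exactly the members of S satisfying p = filter p of sorted S.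
theorem sorted_filter_eq (S T : List String) (p : String → Bool)
    (hS : S.Nodup) (hT : T.Nodup)
    (h : ∀ x, x ∈ T ↔ x ∈ S ∧ p x = true) :
    PySem.List.sorted T (fun x => x) false = (PySem.List.sorted S (fun x => x) false).filter p := by
  have hperm : (PySem.List.sorted S (fun x => x) false).Perm S := PySem.List.sorted_perm _ _ _
  have hnodupS : (PySem.List.sorted S (fun x => x) false).Nodup := hperm.nodup_iff.mpr hS
  have hle : (PySem.List.sorted S (fun x => x) false).Pairwise (fun a b : String => a ≤ b) := by
    simpa using PySem.List.sorted_pairwise S (fun x => x)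
  have hlt : (PySem.List.sorted S (fun x => x) false).Pairwise (fun a b : String => a < b) := by
    have := hnodupS
    rw [List.Nodup] at this
    exact (hle.and this).imp (fun h => lt_of_le_of_ne h.1 h.2)
  apply PySem.List.sorted_eq_of_perm_of_pairwise_lt
  · apply (List.perm_ext_iff_of_nodup (hnodupS.filter p) hT).mpr
    intro x
    simp only [List.mem_filter, hperm.mem_iff, h x]
  · exact hlt.filter p

theorem build_trades_eq (current recommended : List String) (keep_existing : Bool) :
    build_trades current recommended keep_existing
      = build_trades_alt current recommended keep_existing := by
  unfold build_trades build_trades_alt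
  set C : PySem.Set String := PySem.Set.ofList (current.map PySem.Str.upper) with hC
  set R : PySem.Set String := PySem.Set.ofList (recommended.map PySem.Str.upper) with hR
  have hCn : C.Nodup := PySem.Set.nodup_ofList _
  have hRn : R.Nodup := PySem.Set.nodup_ofList _
  have hUn : (PySem.Set.union C R).Nodup := PySem.Set.nodup_union _ _ hCn
  set p1 : String → Bool := fun sym =>
      ((keep_existing && PySem.Set.contains C sym) || PySem.Set.contains R sym)
        && !(PySem.Set.contains C sym) with hp1
  set p2 : String → Bool := fun sym =>
      ((keep_existing && PySem.Set.contains C sym) || PySem.Set.contains R sym)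
        && (PySem.Set.contains C sym) with hp2
  have hfold := foldl_classify p1 p2
      (PySem.List.sorted (PySem.Set.union C R) (fun x => x) false) [] [] []
  simp only [hp1, hp2] at hfold
  simp only []
  rw [hfold]
  simp only [List.nil_append]
  set N : PySem.Set String := if keep_existing then PySem.Set.union C R else R with hN
  have hNn : N.Nodup := by
    rw [hN]; cases keep_existing <;> simp [hUn, hRn]
  refine Prod.ext ?_ (Prod.ext ?_ ?_)
  · -- buys
    apply sorted_filter_eq _ _ _ hUn (PySem.Set.nodup_diff _ _ hNn)
    intro x
    rw [hN]
    cases keep_existing <;>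
      simp [PySem.Set.mem_diff, PySem.Set.mem_union] <;> tauto
  · -- holds
    apply sorted_filter_eq _ _ _ hUn (PySem.Set.nodup_inter _ _ hNn)
    intro x
    rw [hN]
    cases keep_existing <;>
      simp [PySem.Set.mem_inter, PySem.Set.mem_union] <;> tauto
  · -- sells
    apply sorted_filter_eq _ _ _ hUn (PySem.Set.nodup_diff _ _ hCn)
    intro x
    rw [hN]
    cases keep_existing <;>
      simp [PySem.Set.mem_diff, PySem.Set.mem_union] <;> tauto

-- ===== VERDICT (by name: the statement is the Claim_ definition above) =====
theorem build_trades_spec : Claim_equal_build_trades := by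
  intro current recommended keep_existing _
  unfold Spec_build_trades
  exact build_trades_eq current recommended keep_existing
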